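-- pv_equiv track=rewrite | github.com/NamelessMonsterr/GitStory | tests/golden.py | split_commit_blocks
-- ===== SOURCE A (Python) =====
-- def split_commit_blocks(log_text: str) -> list[str]:
--     blocks: list[list[str]] = []
--     current: list[str] = []
--
--     for raw_line in log_text.strip().splitlines():
--         line = raw_line.rstrip()
--         if "|" in line:
--             if current:
--                 blocks.append(current)
--             current = [line]
--             continue
--         if current:
--             current.append(line)
--
--     if current:
--         blocks.append(current)
--
--     return ["\n".join(block) for block in blocks]
-- ===== SOURCE B (Python) =====
-- def _no_bar(line):
--     return '|' not in line
--
--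
-- def _span_no_bar(lines):
--     j = 0
--     while j < len(lines) and _no_bar(lines[j]):
--         j += 1
--     return lines[:j], lines[j:]
--
--
-- def _drop_no_bar(lines):
--     return _span_no_bar(lines)[1]
--
--
-- def split_commit_blocks(log_text: str) -> list[str]:
--     lines = [l.rstrip() for l in log_text.strip().splitlines()]
--     lines = _drop_no_bar(lines)
--     out = []
--     while lines:
--         body, rest = _span_no_bar(lines[1:])
--         out.append("\n".join([lines[0]] + body))
--         lines = rest
--     return out
-- ===== Notes on version B (the rewrite author's own statement) =====
-- stated objective: alternative
-- what changed: B replaces A's blocks/current accumulator fold with a group decomposition: drop the prefix of non-header lines, then repeatedly span off one header line plus its following non-header lines and join each group directly.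
import Mathlib
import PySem

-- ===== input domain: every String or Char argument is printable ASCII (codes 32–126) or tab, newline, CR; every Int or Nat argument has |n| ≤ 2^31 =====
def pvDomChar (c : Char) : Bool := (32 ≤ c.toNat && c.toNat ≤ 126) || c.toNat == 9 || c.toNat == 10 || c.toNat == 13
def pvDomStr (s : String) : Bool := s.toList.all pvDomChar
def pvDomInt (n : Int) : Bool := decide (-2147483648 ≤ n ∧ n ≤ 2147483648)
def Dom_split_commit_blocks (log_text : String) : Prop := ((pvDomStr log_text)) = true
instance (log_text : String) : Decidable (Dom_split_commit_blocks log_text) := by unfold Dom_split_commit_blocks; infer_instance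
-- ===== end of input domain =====

-- B replaces A's blocks/current accumulator fold with a span/group decomposition
-- (drop the non-header prefix, then peel off one header-plus-body group at a time); alternative, not faster.

-- ===== PORT A =====
-- loop body: rstrip the raw line, then the two 'if' branches on "|" in line / current nonempty
def pvStepA (st : List (List String) × List String) (raw_line : String) :
    List (List String) × List String :=
  let line := PySem.Str.rstrip raw_line
  if PySem.Str.isIn "|" line then
    (if st.2.isEmpty then st.1 else st.1 ++ [st.2], [line])
  else
    if st.2.isEmpty then st else (st.1, st.2 ++ [line])

-- trailing 'if current: blocks.append(current)'
def pvFinishA (st : List (List String) × List String) : List (List String) :=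
  if st.2.isEmpty then st.1 else st.1 ++ [st.2]

def split_commit_blocks (log_text : String) : List String :=
  (pvFinishA ((PySem.Str.splitlines (PySem.Str.strip log_text)).foldl pvStepA ([], []))).map
    (fun block => PySem.Str.join "\n" block)

-- ===== PORT B =====
def pvNoBar (line : String) : Bool := !(PySem.Str.isIn "|" line)

-- _span_no_bar: longest non-header prefix, and the rest
def pvSpanNoBar : List String → List String × List String
  | [] => ([], [])
  | x :: t => if pvNoBar x then (x :: (pvSpanNoBar t).1, (pvSpanNoBar t).2)
              else ([], x :: t)

def pvDropNoBar (lines : List String) : List String := (pvSpanNoBar lines).2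

theorem pvSpanNoBar_snd_length_le (ls : List String) : (pvSpanNoBar ls).2.length ≤ ls.length := by
  induction ls with
  | nil => simp [pvSpanNoBar]
  | cons x t ih =>
    simp only [pvSpanNoBar]
    split
    · simpa using Nat.le_succ_of_le ih
    · simp

-- the 'while lines:' loop: peel one header group per step
def pvBlocksB : List String → List String
  | [] => []
  | h :: t =>
    PySem.Str.join "\n" (h :: (pvSpanNoBar t).1) :: pvBlocksB (pvSpanNoBar t).2
termination_by ls => ls.length
decreasing_by exact Nat.lt_succ_of_le (pvSpanNoBar_snd_length_le t)

def split_commit_blocks_alt (log_text : String) : List String :=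
  pvBlocksB (pvDropNoBar ((PySem.Str.splitlines (PySem.Str.strip log_text)).map PySem.Str.rstrip))

-- ===== PRECONDITION & SPEC =====
def Spec_split_commit_blocks (log_text : String) (out : List String) : Prop := out = split_commit_blocks_alt log_text
instance (log_text : String) (out : List String) : Decidable (Spec_split_commit_blocks log_text out) := by unfold Spec_split_commit_blocks; infer_instance

-- ===== CLAIM (what is proved, stated in full; the proofs are below) =====
def Claim_equal_split_commit_blocks : Prop := ∀ (log_text : String), Dom_split_commit_blocks log_text → Spec_split_commit_blocks log_text (split_commit_blocks log_text)

-- ===== LEMMAS AND PROOFS =====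

-- A's step on an already-rstripped line (rstrip is idempotent-free here: we fold over mapped lines)
def pvStepA' (st : List (List String) × List String) (line : String) :
    List (List String) × List String :=
  if PySem.Str.isIn "|" line then
    (if st.2.isEmpty then st.1 else st.1 ++ [st.2], [line])
  else
    if st.2.isEmpty then st else (st.1, st.2 ++ [line])

-- the groups at list-of-lists level, mirroring pvBlocksB
def pvGroups : List String → List (List String)
  | [] => []
  | h :: t => (h :: (pvSpanNoBar t).1) :: pvGroups (pvSpanNoBar t).2
termination_by ls => ls.length
decreasing_by exact Nat.lt_succ_of_le (pvSpanNoBar_snd_length_le t)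

theorem pvBlocksB_eq_map (ls : List String) :
    pvBlocksB ls = (pvGroups ls).map (fun b => PySem.Str.join "\n" b) := by
  induction ls using pvBlocksB.induct with
  | case1 => simp [pvBlocksB, pvGroups]
  | case2 h t ih => rw [pvBlocksB, pvGroups]; simp [ih]

theorem pvLoop_cur_ne (ls : List String) :
    ∀ (blocks : List (List String)) (cur : List String), cur ≠ [] →
      pvFinishA (ls.foldl pvStepA' (blocks, cur)) =
        blocks ++ (cur ++ (pvSpanNoBar ls).1) :: pvGroups (pvSpanNoBar ls).2 := by
  induction ls with
  | nil =>
    intro blocks cur hc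
    simp [pvFinishA, pvSpanNoBar, pvGroups, List.isEmpty_iff, hc]
  | cons x t ih =>
    intro blocks cur hc
    by_cases hx : PySem.Chars.isIn ['|'] x.toList = true
    · have hstep : pvStepA' (blocks, cur) x = (blocks ++ [cur], [x]) := by
        simp [pvStepA', hx, List.isEmpty_iff, hc]
      rw [List.foldl_cons, hstep, ih (blocks ++ [cur]) [x] (by simp)]
      have hspan : pvSpanNoBar (x :: t) = ([], x :: t) := by
        simp [pvSpanNoBar, pvNoBar, hx]
      rw [hspan]
      rw [pvGroups]
      simp
    · have hstep : pvStepA' (blocks, cur) x = (blocks, cur ++ [x]) := by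
        simp [pvStepA', hx, List.isEmpty_iff, hc]
      rw [List.foldl_cons, hstep, ih blocks (cur ++ [x]) (by simp)]
      have hspan : pvSpanNoBar (x :: t) = (x :: (pvSpanNoBar t).1, (pvSpanNoBar t).2) := by
        simp [pvSpanNoBar, pvNoBar, hx]
      rw [hspan]
      simp

theorem pvLoop_cur_nil (ls : List String) :
    ∀ (blocks : List (List String)),
      pvFinishA (ls.foldl pvStepA' (blocks, [])) = blocks ++ pvGroups (pvDropNoBar ls) := by
  induction ls with
  | nil => intro blocks; simp [pvFinishA, pvDropNoBar, pvSpanNoBar, pvGroups]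
  | cons x t ih =>
    intro blocks
    by_cases hx : PySem.Chars.isIn ['|'] x.toList = true
    · have hstep : pvStepA' (blocks, ([] : List String)) x = (blocks, [x]) := by
        simp [pvStepA', hx]
      rw [List.foldl_cons, hstep, pvLoop_cur_ne t blocks [x] (by simp)]
      have hdrop : pvDropNoBar (x :: t) = x :: t := by
        simp [pvDropNoBar, pvSpanNoBar, pvNoBar, hx]
      rw [hdrop, pvGroups]
      simp
    · have hstep : pvStepA' (blocks, ([] : List String)) x = (blocks, []) := by
        simp [pvStepA', hx]
      rw [List.foldl_cons, hstep, ih blocks]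
      have hdrop : pvDropNoBar (x :: t) = pvDropNoBar t := by
        simp [pvDropNoBar, pvSpanNoBar, pvNoBar, hx]
      rw [hdrop]

-- ===== VERDICT (by name: the statement is the Claim_ definition above) =====
theorem split_commit_blocks_spec : Claim_equal_split_commit_blocks := by
  intro log_text _
  unfold Spec_split_commit_blocks split_commit_blocks split_commit_blocks_alt
  have hfold : (PySem.Str.splitlines (PySem.Str.strip log_text)).foldl pvStepA ([], []) =
      ((PySem.Str.splitlines (PySem.Str.strip log_text)).map PySem.Str.rstrip).foldl
        pvStepA' ([], []) := by
    rw [List.foldl_map]; rfl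
  rw [hfold, pvLoop_cur_nil, pvBlocksB_eq_map]
  simp
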